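-- pv_equiv track=rewrite | github.com/stasptkk-cpu/free_knots | functions.py | normalize_bracket_term
-- ===== SOURCE A (Python) =====
-- def normalize_bracket_term(term):
--     """
--     Нормализует слагаемое скобки четности для сравнения.
--
--     Параметры:
--     ----------
--     term : list
--         Слагаемое скобки четности
--
--     Возвращает:
--     -----------
--     list
--         Нормализованное слагаемое
--     """
--     normalized_components = []
--     for component in term:
--         if component:
--             best_representation = find_canonical_cyclic_form(component)
--             normalized_components.append(best_representation)
--         else:
--             normalized_components.append([])
--
--     normalized_components.sort(key=lambda x: (len(x), x))
--     return normalized_components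
--
-- def find_canonical_cyclic_form(diagram):
--     """
--     Находит каноническую циклическую форму диаграммы.
--
--     Параметры:
--     ----------
--     diagram : list
--         Хордовая диаграмма
--
--     Возвращает:
--     -----------
--     list
--         Каноническое представление диаграммы
--     """
--     if not diagram:
--         return []
--
--     all_representations = []
--     diagram_length = len(diagram)
--
--     for shift_amount in range(diagram_length):
--         shifted = diagram[shift_amount:] + diagram[:shift_amount]
--         all_representations.append(tuple(shifted))
--
--     mirror_image = diagram[::-1]
--     for shift_amount in range(diagram_length):
--         shifted_mirror = mirror_image[shift_amount:] + mirror_image[:shift_amount]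
--         all_representations.append(tuple(shifted_mirror))
--
--     canonical_form = min(all_representations)
--     return list(canonical_form)
-- ===== SOURCE B (Python) =====
-- def _least_rotation(d):
--     # Candidate-elimination: keep the set of start positions whose rotation
--     # agrees with the lexicographic minimum on the first k elements; round k
--     # removes every candidate whose k-th element is not minimal among the
--     # survivors.  Stops as soon as a single candidate remains.
--     n = len(d)
--     dd = d + d
--     cand = list(range(n))
--     for k in range(n):
--         m = min(dd[i + k] for i in cand)
--         cand = [i for i in cand if dd[i + k] == m]
--         if len(cand) == 1:
--             break
--     i = cand[0]
--     return dd[i:i + n]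
--
--
-- def _canonical(d):
--     if not d:
--         return []
--     a = _least_rotation(d)
--     b = _least_rotation(d[::-1])
--     return a if a <= b else b
--
--
-- def normalize_bracket_term(term):
--     return sorted((_canonical(component) for component in term),
--                   key=lambda x: (len(x), x))
-- ===== Notes on version B (the rewrite author's own statement) =====
-- stated objective: alternative
-- what changed: Instead of materialising all 2n rotations of each component and taking min, B finds the least rotation by candidate elimination: it keeps a shrinking list of start positions, each round discarding those whose next element is not minimal among the survivors and stopping at a single survivor; applied to the component and its reverse, taking the smaller.
import Mathlib
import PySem

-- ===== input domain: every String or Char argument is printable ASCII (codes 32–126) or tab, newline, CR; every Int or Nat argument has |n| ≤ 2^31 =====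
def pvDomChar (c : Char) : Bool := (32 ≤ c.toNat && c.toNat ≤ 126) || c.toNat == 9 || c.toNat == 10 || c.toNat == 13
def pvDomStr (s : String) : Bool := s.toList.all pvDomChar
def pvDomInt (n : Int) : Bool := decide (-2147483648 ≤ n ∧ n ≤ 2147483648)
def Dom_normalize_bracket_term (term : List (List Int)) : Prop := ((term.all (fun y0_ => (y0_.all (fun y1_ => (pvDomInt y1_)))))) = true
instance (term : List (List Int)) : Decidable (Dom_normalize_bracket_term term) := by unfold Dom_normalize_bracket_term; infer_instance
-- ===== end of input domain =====

-- B finds each component's least rotation by candidate elimination (iteratively filtering start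
-- positions by successive elements of the rotation) instead of materialising all rotations and
-- taking min; alternative algorithm, usually one elimination round on distinct-valued data.


-- ===== PORT A =====
-- find_canonical_cyclic_form: all shift-slices of the diagram and of its mirror, take min
def pv_find_canonical_cyclic_form (diagram : List Int) : List Int :=
  if diagram = [] then []
  else
    let n : Int := PySem.List.len diagram
    let reps1 := (PySem.List.pyRange 0 n 1).map (fun s =>
      PySem.List.slice diagram (some s) none ++ PySem.List.slice diagram none (some s))
    let mirror := (PySem.List.slice? diagram none none (-1)).getD []
    let reps2 := (PySem.List.pyRange 0 n 1).map (fun s =>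
      PySem.List.slice mirror (some s) none ++ PySem.List.slice mirror none (some s))
    (PySem.List.min? (reps1 ++ reps2) (fun x => x)).getD []

def normalize_bracket_term (term : List (List Int)) : List (List Int) :=
  let normalized := term.map (fun component =>
    if component ≠ [] then pv_find_canonical_cyclic_form component else [])
  PySem.List.sorted2 normalized (fun x => PySem.List.len x) (fun x => x) false

-- ===== PORT B =====
-- the elimination loop: in round k keep the candidate start positions i whose k-th element
-- dd[i+k] is minimal among the surviving candidates; stop when one candidate remains.
-- (all indices i+k are in range of dd, so List.getD is exact for Python's dd[i+k])
def pv_elim (dd : List Int) (n : Nat) (k : Nat) (cand : List Nat) : List Nat :=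
  if k < n then
    let cand' := cand.filter (fun i => dd.getD (i + k) 0 ==
      (PySem.List.min? (cand.map (fun i => dd.getD (i + k) 0)) (fun x => x)).getD 0)
    if cand'.length = 1 then cand' else pv_elim dd n (k + 1) cand'
  else cand
termination_by n - k

def pv_least_rotation (d : List Int) : List Int :=
  let n := d.length
  let dd := d ++ d
  match pv_elim dd n 0 (List.range n) with
  | [] => []  -- unreachable for the nonempty d this is called on (Python's cand[0] would raise)
  | i :: _ => PySem.List.slice dd (some (i : Int)) (some ((i : Int) + (n : Int)))

def pv_canonical (d : List Int) : List Int :=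
  if d = [] then []
  else
    let a := pv_least_rotation d
    let b := pv_least_rotation ((PySem.List.slice? d none none (-1)).getD [])
    if a ≤ b then a else b

def normalize_bracket_term_alt (term : List (List Int)) : List (List Int) :=
  PySem.List.sorted2 (term.map pv_canonical) (fun x => PySem.List.len x) (fun x => x) false

-- ===== PRECONDITION & SPEC =====
def Spec_normalize_bracket_term (term : List (List Int)) (out : List (List Int)) : Prop := out = normalize_bracket_term_alt term
instance (term : List (List Int)) (out : List (List Int)) : Decidable (Spec_normalize_bracket_term term out) := by unfold Spec_normalize_bracket_term; infer_instance

-- ===== CLAIM (what is proved, stated in full; the proofs are below) =====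
def Claim_equal_normalize_bracket_term : Prop := ∀ (term : List (List Int)), Dom_normalize_bracket_term term → Spec_normalize_bracket_term term (normalize_bracket_term term)

-- ===== LEMMAS AND PROOFS =====

-- rotation of d by k, and the value of min() over a nonempty list of lists
def pvRot (d : List Int) (k : Nat) : List Int := d.drop k ++ d.take k

def pvLmin (xs : List (List Int)) : List Int :=
  (PySem.List.min? xs (fun x => x)).getD []

-- the default instances the ports elaborate with are defeq to the LinearOrder ones
theorem pvMin?_inst (xs : List (List Int)) :
    (@PySem.List.min? (List Int) (List Int) List.instLT (fun a b => a.decidableLT b) xs (fun x => x))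
    = (@PySem.List.min? (List Int) (List Int) Preorder.toLT LinearOrder.toDecidableLT xs (fun x => x)) := by
  congr 1

theorem pvLmin_spec (xs : List (List Int)) (hx : xs ≠ []) :
    pvLmin xs ∈ xs ∧ ∀ y ∈ xs, pvLmin xs ≤ y := by
  unfold pvLmin
  rcases h : PySem.List.min? xs (fun x => x) with _ | m
  · exact absurd (Iff.mp (@PySem.List.min?_eq_none_iff (List Int) (List Int) Preorder.toLT
      LinearOrder.toDecidableLT xs (fun x => x)) ((pvMin?_inst xs).symm.trans h)) hx
  · exact ⟨PySem.List.min?_mem h,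
      fun y hy => PySem.List.min?_isMin ((pvMin?_inst xs).symm.trans h) y hy⟩

theorem pvLmin_append (xs ys : List (List Int)) (hx : xs ≠ []) (hy : ys ≠ []) :
    pvLmin (xs ++ ys) = if pvLmin xs ≤ pvLmin ys then pvLmin xs else pvLmin ys := by
  have hxy : xs ++ ys ≠ [] := by simp [hx]
  obtain ⟨hmem, hmin⟩ := pvLmin_spec (xs ++ ys) hxy
  obtain ⟨hxmem, hxmin⟩ := pvLmin_spec xs hx
  obtain ⟨hymem, hymin⟩ := pvLmin_spec ys hy
  have hcx : pvLmin (xs ++ ys) ≤ pvLmin xs := hmin _ (by simp [hxmem])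
  have hcy : pvLmin (xs ++ ys) ≤ pvLmin ys := hmin _ (by simp [hymem])
  rcases List.mem_append.mp hmem with h | h
  · have he : pvLmin (xs ++ ys) = pvLmin xs := le_antisymm hcx (hxmin _ h)
    rw [he] at hcy ⊢
    simp [hcy]
  · have he : pvLmin (xs ++ ys) = pvLmin ys := le_antisymm hcy (hymin _ h)
    rw [he] at hcx ⊢
    split_ifs with hle
    · exact le_antisymm hcx hle
    · rfl

-- min() over Int with no key: membership and minimality
theorem pvIntMin_spec (d : List Int) (hd : d ≠ []) :
    (PySem.List.min? d (fun x => x)).getD 0 ∈ d ∧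
      ∀ x ∈ d, (PySem.List.min? d (fun x => x)).getD 0 ≤ x := by
  rcases h : PySem.List.min? d (fun x => x) with _ | m
  · exact absurd (Iff.mp (PySem.List.min?_eq_none_iff d _) h) hd
  · exact ⟨by simp [PySem.List.min?_mem h], by
      intro x hx
      simpa using PySem.List.min?_isMin h x hx⟩

-- A's shift-slices are rotations
theorem pvA_reps (d : List Int) :
    (PySem.List.pyRange 0 (PySem.List.len d) 1).map (fun s =>
      PySem.List.slice d (some s) none ++ PySem.List.slice d none (some s))
    = (List.range d.length).map (pvRot d) := by
  rw [PySem.List.pyRange_one, List.map_map]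
  simp only [PySem.List.len_eq, sub_zero, Int.toNat_natCast]
  refine List.map_congr_left ?_
  intro k hk
  simp [PySem.List.slice_from_natCast, PySem.List.slice_to_natCast, pvRot]

-- B's doubled-list slices are rotations
theorem pvB_slice (d : List Int) (k : Nat) (hk : k ≤ d.length) :
    PySem.List.slice (d ++ d) (some (k : Int)) (some ((k : Int) + (d.length : Int)))
    = pvRot d k := by
  rw [PySem.List.slice_natCast_add]
  rw [List.drop_append]
  have h1 : k - d.length = 0 := by omega
  rw [h1, List.drop_zero, List.take_append]
  have h2 : (d.drop k).length = d.length - k := by simp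
  have h3 : d.length - (d.drop k).length = k := by omega
  rw [List.take_of_length_le (by omega : (d.drop k).length ≤ d.length), h3, pvRot]

theorem pvRot_length (d : List Int) (i : Nat) (hi : i ≤ d.length) :
    (pvRot d i).length = d.length := by
  simp [pvRot]
  omega

theorem pv_drop_dd (d : List Int) (i : Nat) (hi : i ≤ d.length) :
    (d ++ d).drop i = pvRot d i ++ d.drop i := by
  rw [List.drop_append_of_le_length hi, pvRot, List.append_assoc, List.take_append_drop]

-- the doubled-list element dd[i+k] is the k-th element of the rotation by i
theorem pv_idx (d : List Int) (i k : Nat) (hi : i < d.length) (hk : k < d.length) :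
    (d ++ d).getD (i + k) 0 = (pvRot d i).getD k 0 := by
  rw [List.getD_eq_getElem?_getD, List.getD_eq_getElem?_getD, ← List.getElem?_drop,
    pv_drop_dd d i (le_of_lt hi),
    List.getElem?_append_left (by rw [pvRot_length d i hi.le]; exact hk)]

theorem pv_getElem?_eq_getD (l : List Int) (k : Nat) (hk : k < l.length) :
    l[k]? = some (l.getD k 0) := by
  rw [List.getD_eq_getElem?_getD, List.getElem?_eq_getElem hk]
  rfl

-- lists agreeing on their first k elements compare by the k-th
theorem pv_lex_lt (k : Nat) : ∀ (a b : List Int), a.take k = b.take k →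
    k < a.length → k < b.length → a.getD k 0 < b.getD k 0 → a < b := by
  induction k with
  | zero =>
    intro a b _ ha hb hlt
    cases a with
    | nil => simp at ha
    | cons x xs =>
      cases b with
      | nil => simp at hb
      | cons y ys => exact List.Lex.rel (by simpa [List.getD] using hlt)
  | succ k ih =>
    intro a b htake ha hb hlt
    cases a with
    | nil => simp at ha
    | cons x xs =>
      cases b with
      | nil => simp at hb
      | cons y ys =>
        simp only [List.take_succ_cons, List.cons.injEq] at htake
        obtain ⟨rfl, ht⟩ := htake
        exact List.Lex.cons (ih xs ys ht (by simpa using ha) (by simpa using hb)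
          (by simpa [List.getD] using hlt))

-- invariant of the elimination loop: candidates are in range, agree on the first k
-- elements of their rotations, and dominate every rotation
def pvGood (d : List Int) (k : Nat) (cand : List Nat) : Prop :=
  cand ≠ [] ∧ (∀ i ∈ cand, i < d.length) ∧
  (∀ i ∈ cand, ∀ j ∈ cand, (pvRot d i).take k = (pvRot d j).take k) ∧
  (∀ j, j < d.length → ∃ i ∈ cand, pvRot d i ≤ pvRot d j)

theorem pv_good_step (d : List Int) (k : Nat) (cand : List Nat)
    (hk : k < d.length) (h : pvGood d k cand) :
    pvGood d (k + 1) (cand.filter (fun i => (d ++ d).getD (i + k) 0 ==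
      (PySem.List.min? (cand.map (fun i => (d ++ d).getD (i + k) 0)) (fun x => x)).getD 0)) := by
  obtain ⟨hne, hbnd, hagree, hdom⟩ := h
  set f : Nat → Int := fun i => (d ++ d).getD (i + k) 0 with hf
  set m : Int := (PySem.List.min? (cand.map f) (fun x => x)).getD 0 with hm
  have hvals : cand.map f ≠ [] := by simpa using hne
  obtain ⟨hm_mem, hm_min⟩ := pvIntMin_spec (cand.map f) hvals
  obtain ⟨i0, hi0c, hi0m⟩ := List.mem_map.mp hm_mem
  have hkey : ∀ i ∈ cand, f i = (pvRot d i).getD k 0 := fun i hi =>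
    pv_idx d i k (hbnd i hi) hk
  have hfi0m : f i0 = m := hi0m.trans hm.symm
  have hi0' : i0 ∈ cand.filter (fun i => f i == m) :=
    List.mem_filter.mpr ⟨hi0c, by simp only [beq_iff_eq]; exact hfi0m⟩
  refine ⟨List.ne_nil_of_mem hi0', ?_, ?_, ?_⟩
  · intro i hi
    exact hbnd i (List.mem_of_mem_filter hi)
  · intro i hi j hj
    have hic := List.mem_of_mem_filter hi
    have hjc := List.mem_of_mem_filter hj
    have hfi : f i = m := by simpa using (List.mem_filter.mp hi).2
    have hfj : f j = m := by simpa using (List.mem_filter.mp hj).2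
    rw [List.take_add_one, List.take_add_one, hagree i hic j hjc,
      pv_getElem?_eq_getD _ k (by rw [pvRot_length d i (hbnd i hic).le]; exact hk),
      pv_getElem?_eq_getD _ k (by rw [pvRot_length d j (hbnd j hjc).le]; exact hk),
      ← hkey i hic, ← hkey j hjc, hfi, hfj]
  · intro j hj
    obtain ⟨i, hic, hile⟩ := hdom j hj
    by_cases hfi : f i = m
    · exact ⟨i, List.mem_filter.mpr ⟨hic, by simp only [beq_iff_eq]; exact hfi⟩, hile⟩
    · refine ⟨i0, hi0', le_trans (le_of_lt ?_) hile⟩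
      refine pv_lex_lt k (pvRot d i0) (pvRot d i) (hagree i0 hi0c i hic)
        (by rw [pvRot_length d i0 (hbnd i0 hi0c).le]; exact hk)
        (by rw [pvRot_length d i (hbnd i hic).le]; exact hk) ?_
      rw [← hkey i0 hi0c, ← hkey i hic, hfi0m]
      exact lt_of_le_of_ne (hm_min (f i) (List.mem_map_of_mem hic)) (Ne.symm hfi)

-- a candidate set satisfying the invariant with all rotations fully compared: its head is minimal
theorem pv_good_done (d : List Int) (k : Nat) (cand : List Nat)
    (h : pvGood d k cand) (hfull : d.length ≤ k) :
    ∃ i l, cand = i :: l ∧ i < d.length ∧ ∀ j, j < d.length → pvRot d i ≤ pvRot d j := by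
  obtain ⟨hne, hbnd, hagree, hdom⟩ := h
  cases cand with
  | nil => exact absurd rfl hne
  | cons i l =>
    refine ⟨i, l, rfl, hbnd i (by simp), ?_⟩
    intro j hj
    obtain ⟨i', hi'c, hi'le⟩ := hdom j hj
    have heq : pvRot d i = pvRot d i' := by
      have ht := hagree i (by simp) i' hi'c
      rwa [List.take_of_length_le (by rw [pvRot_length d i (hbnd i (by simp)).le]; omega),
        List.take_of_length_le (by rw [pvRot_length d i' (hbnd i' hi'c).le]; omega)] at ht
    rw [heq]
    exact hi'le

theorem pv_elim_post_aux (d : List Int) (f : Nat) : ∀ (k : Nat) (cand : List Nat),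
    d.length ≤ k + f → pvGood d k cand →
    ∃ i l, pv_elim (d ++ d) d.length k cand = i :: l ∧ i < d.length ∧
      ∀ j, j < d.length → pvRot d i ≤ pvRot d j := by
  induction f with
  | zero =>
    intro k cand hfuel h
    rw [pv_elim, if_neg (by omega)]
    exact pv_good_done d k cand h (by omega)
  | succ f ih =>
    intro k cand hfuel h
    rw [pv_elim]
    by_cases hk : k < d.length
    · rw [if_pos hk]
      have h' := pv_good_step d k cand hk h
      set cand' := cand.filter (fun i => (d ++ d).getD (i + k) 0 ==
        (PySem.List.min? (cand.map (fun i => (d ++ d).getD (i + k) 0)) (fun x => x)).getD 0)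
        with hc
      by_cases hl : cand'.length = 1
      · rw [if_pos hl]
        obtain ⟨a, ha⟩ := List.length_eq_one_iff.mp hl
        obtain ⟨hne, hbnd, hagree, hdom⟩ := h'
        refine ⟨a, [], ha, hbnd a (by rw [ha]; simp), ?_⟩
        intro j hj
        obtain ⟨i, hic, hile⟩ := hdom j hj
        rw [ha] at hic
        simp at hic
        rwa [← hic]
      · rw [if_neg hl]
        exact ih (k + 1) cand' (by omega) h'
    · rw [if_neg hk]
      exact pv_good_done d k cand h (by omega)

-- B's least rotation is the minimum of all rotations
theorem pv_least_rotation_eq (d : List Int) (hd : d ≠ []) :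
    pv_least_rotation d = pvLmin ((List.range d.length).map (pvRot d)) := by
  have hn : 0 < d.length := List.length_pos_iff.mpr hd
  have hgood : pvGood d 0 (List.range d.length) := by
    refine ⟨by simp; omega, by simp, by simp, ?_⟩
    intro j hj
    exact ⟨j, List.mem_range.mpr hj, le_rfl⟩
  obtain ⟨i, l, heq, hi, hmin⟩ := pv_elim_post_aux d d.length 0 (List.range d.length)
    (by omega) hgood
  have hmap : (List.range d.length).map (pvRot d) ≠ [] := by
    simp
    omega
  obtain ⟨hmem, hlemin⟩ := pvLmin_spec _ hmap
  have h1 : pvRot d i ≤ pvLmin ((List.range d.length).map (pvRot d)) := by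
    obtain ⟨j, hjr, hje⟩ := List.mem_map.mp hmem
    rw [← hje]
    exact hmin j (List.mem_range.mp hjr)
  have h2 : pvLmin ((List.range d.length).map (pvRot d)) ≤ pvRot d i :=
    hlemin _ (List.mem_map_of_mem (List.mem_range.mpr hi))
  unfold pv_least_rotation
  simp only [heq]
  rw [pvB_slice d i hi.le]
  exact le_antisymm h1 h2

-- per-component equality of the two canonical forms
theorem pv_canonical_eq (c : List Int) :
    (if c ≠ [] then pv_find_canonical_cyclic_form c else []) = pv_canonical c := by
  by_cases hc : c = []
  · simp [hc, pv_canonical]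
  · have hr : c.reverse ≠ [] := by simpa using hc
    simp only [hc, ne_eq, not_false_eq_true, if_pos]
    unfold pv_find_canonical_cyclic_form pv_canonical
    rw [if_neg hc, if_neg hc]
    simp only [PySem.List.slice?_none_none_neg_one, Option.getD_some]
    have hlen : PySem.List.len c = PySem.List.len c.reverse := by
      simp [PySem.List.len_eq]
    rw [hlen, pvA_reps c.reverse]
    conv_lhs => rw [show (PySem.List.len c.reverse) = (PySem.List.len c) from hlen.symm]
    rw [pvA_reps c]
    have hlp : 0 < c.length := List.length_pos_iff.mpr hc
    have h1 : (List.range c.length).map (pvRot c) ≠ [] := by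
      simp
      omega
    have h2 : (List.range c.reverse.length).map (pvRot c.reverse) ≠ [] := by
      simp
      omega
    rw [show ((PySem.List.min? ((List.range c.length).map (pvRot c) ++
        (List.range c.reverse.length).map (pvRot c.reverse)) (fun x => x)).getD []) =
        pvLmin ((List.range c.length).map (pvRot c) ++
        (List.range c.reverse.length).map (pvRot c.reverse)) from rfl]
    rw [pvLmin_append _ _ h1 h2]
    rw [pv_least_rotation_eq c hc, pv_least_rotation_eq c.reverse hr]

-- ===== VERDICT (by name: the statement is the Claim_ definition above) =====
theorem normalize_bracket_term_spec : Claim_equal_normalize_bracket_term := by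
  intro term _
  unfold Spec_normalize_bracket_term normalize_bracket_term normalize_bracket_term_alt
  simp only [pv_canonical_eq]
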